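-- pv_equiv track=rewrite | github.com/Limnetic-Git/Godot-Python-for-map-generating-game-procedural-map- | Tiles/generator.py | resize_array
-- ===== SOURCE A (Python) =====
-- def resize_array(world, scale):
--     scaled_vertically = []
--     for row in world:
--         for _ in range(scale):
--             scaled_vertically.append(row.copy())
--
--     scaled_horizontally = []
--     for row in scaled_vertically:
--         new_row = []
--         for item in row:
--             new_row.extend([item] * scale)
--         scaled_horizontally.append(new_row)
--
--     return scaled_horizontally
-- ===== SOURCE B (Python) =====
-- def resize_array(world, scale):
--     out = []
--     for row in world:
--         expanded = [item for item in row for _ in range(scale)]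
--         for _ in range(scale):
--             out.append(expanded.copy())
--     return out
-- ===== Notes on version B (the rewrite author's own statement) =====
-- stated objective: simpler
-- what changed: Single pass over input rows: each row's column expansion is computed once and replicated scale times, instead of A's two sequential passes (replicate all rows, then expand every replica).
import Mathlib
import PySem

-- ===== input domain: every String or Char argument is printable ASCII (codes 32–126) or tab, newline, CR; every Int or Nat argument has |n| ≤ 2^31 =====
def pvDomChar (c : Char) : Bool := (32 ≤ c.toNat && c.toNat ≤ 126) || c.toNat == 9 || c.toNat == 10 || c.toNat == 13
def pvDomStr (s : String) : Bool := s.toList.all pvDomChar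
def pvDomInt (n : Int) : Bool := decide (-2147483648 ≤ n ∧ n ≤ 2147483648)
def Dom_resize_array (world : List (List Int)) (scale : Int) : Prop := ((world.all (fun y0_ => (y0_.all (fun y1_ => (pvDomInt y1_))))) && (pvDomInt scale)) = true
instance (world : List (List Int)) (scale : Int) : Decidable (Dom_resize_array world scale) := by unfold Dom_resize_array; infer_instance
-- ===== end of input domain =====

-- B computes each row's column expansion once and replicates it, in one pass over the
-- input rows, instead of A's two passes (replicate rows, then expand every replica).


-- ===== PORT A =====
-- 'for _ in range(scale): append(row.copy())' : range(scale) has scale.toNat iterations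
def resize_array (world : List (List Int)) (scale : Int) : List (List Int) :=
  let scaled_vertically :=
    world.foldl (fun acc row => acc ++ List.replicate scale.toNat row) []
  scaled_vertically.foldl
    (fun acc row =>
      let new_row := row.foldl (fun nr item => nr ++ List.replicate scale.toNat item) []
      acc ++ [new_row]) []

-- ===== PORT B =====
-- one pass: expand each row once, emit scale copies of it
def resize_array_alt (world : List (List Int)) (scale : Int) : List (List Int) :=
  world.flatMap (fun row =>
    let expanded := row.flatMap (fun item => List.replicate scale.toNat item)
    List.replicate scale.toNat expanded)

-- ===== PRECONDITION & SPEC =====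
def Spec_resize_array (world : List (List Int)) (scale : Int) (out : List (List Int)) : Prop := out = resize_array_alt world scale
instance (world : List (List Int)) (scale : Int) (out : List (List Int)) : Decidable (Spec_resize_array world scale out) := by unfold Spec_resize_array; infer_instance

-- ===== CLAIM (what is proved, stated in full; the proofs are below) =====
def Claim_equal_resize_array : Prop := ∀ (world : List (List Int)) (scale : Int), Dom_resize_array world scale → Spec_resize_array world scale (resize_array world scale)

-- ===== LEMMAS AND PROOFS =====

-- accumulator-appending foldl with replicate = flatMap replicate
theorem foldl_rep {α : Type} (n : Nat) (xs : List α) (acc : List α) :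
    xs.foldl (fun a r => a ++ List.replicate n r) acc
      = acc ++ xs.flatMap (fun r => List.replicate n r) := by
  induction xs generalizing acc with
  | nil => simp
  | cons x xs ih => simp [List.foldl, ih]

theorem foldl_map (f : List Int → List Int) (xs : List (List Int)) (acc : List (List Int)) :
    xs.foldl (fun a r => a ++ [f r]) acc = acc ++ xs.map f := by
  induction xs generalizing acc with
  | nil => simp
  | cons x xs ih => simp [List.foldl, ih]

-- ===== VERDICT (by name: the statement is the Claim_ definition above) =====
theorem resize_array_spec : Claim_equal_resize_array := by
  intro world scale _
  unfold Spec_resize_array resize_array resize_array_alt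
  simp only [foldl_rep, foldl_map, List.nil_append, List.map_flatMap]
  congr 1
  funext row
  simp [List.map_replicate]
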